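-- pv_equiv track=rewrite | github.com/VGeroutskis/qrgenerator | qrgenerator/qr_generator.py | _interleave_blocks
-- ===== SOURCE A (Python) =====
-- from typing import Optional, List, Tuple
--
-- def _interleave_blocks(data_blocks: List[List[int]], ec_blocks: List[List[int]]) -> List[int]:
--     result = []
--     max_data_len = max(len(block) for block in data_blocks)
--     for i in range(max_data_len):
--         for block in data_blocks:
--             if i < len(block):
--                 result.append(block[i])
--     max_ec_len = max(len(block) for block in ec_blocks) if ec_blocks else 0
--     for i in range(max_ec_len):
--         for block in ec_blocks:
--             if i < len(block):
--                 result.append(block[i])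
--     return result
-- ===== SOURCE B (Python) =====
-- def _interleave_blocks(data_blocks, ec_blocks):
--     # Index-free column peeling: keep one iterator per block, emit the next
--     # element of each still-live block per round, dropping exhausted blocks.
--     def weave(blocks):
--         out = []
--         its = [iter(b) for b in blocks]
--         while its:
--             nxt = []
--             for it in its:
--                 for v in it:
--                     out.append(v)
--                     nxt.append(it)
--                     break
--             its = nxt
--         return out
--     return weave(data_blocks) + weave(ec_blocks)
-- ===== Notes on version B (the rewrite author's own statement) =====
-- stated objective: alternative
-- what changed: Replaces the explicit row-index loops with bounds checks by index-free column peeling: one iterator per block, each round emits the next element of every still-live block and drops exhausted ones.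
import Mathlib
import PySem

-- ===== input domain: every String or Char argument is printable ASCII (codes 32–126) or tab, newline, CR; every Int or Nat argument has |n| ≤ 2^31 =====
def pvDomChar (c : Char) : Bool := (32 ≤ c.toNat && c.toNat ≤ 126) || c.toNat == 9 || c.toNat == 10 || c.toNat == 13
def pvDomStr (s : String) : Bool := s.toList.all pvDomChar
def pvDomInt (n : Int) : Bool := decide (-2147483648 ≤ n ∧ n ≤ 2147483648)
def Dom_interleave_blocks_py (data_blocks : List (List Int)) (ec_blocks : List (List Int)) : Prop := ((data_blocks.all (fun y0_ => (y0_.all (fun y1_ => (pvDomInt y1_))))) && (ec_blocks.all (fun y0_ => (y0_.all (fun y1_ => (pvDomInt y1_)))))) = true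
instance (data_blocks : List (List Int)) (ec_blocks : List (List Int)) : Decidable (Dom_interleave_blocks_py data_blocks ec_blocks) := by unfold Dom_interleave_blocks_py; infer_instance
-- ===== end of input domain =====

-- B replaces A's row-index loops by index-free column peeling (objective: alternative, same cost).

-- ===== PORT A =====
-- max(len(block) for block in data_blocks); on the empty list Python raises ValueError
-- (excluded by Pre_); on a nonempty list foldl max 0 equals Python's max since lengths are ≥ 0.
def interleave_blocks_py (data_blocks : List (List Int)) (ec_blocks : List (List Int)) : List Int :=
  let max_data_len := (data_blocks.map List.length).foldl max 0
  let r1 := (List.range max_data_len).foldl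
    (fun r i => data_blocks.foldl
      (fun r block => if i < block.length then r ++ [block.getD i 0] else r) r) []
  let max_ec_len := if ec_blocks.isEmpty then 0 else (ec_blocks.map List.length).foldl max 0
  (List.range max_ec_len).foldl
    (fun r i => ec_blocks.foldl
      (fun r block => if i < block.length then r ++ [block.getD i 0] else r) r) r1

-- ===== PORT B =====
-- arithmetic helper cited by pvPeel's termination proof
theorem pvAux : ∀ (l : List (List Int)), (∀ b ∈ l, 1 ≤ b.length) →
    (l.map (fun b => b.tail.length)).sum + l.length = (l.map List.length).sum := by
  intro l
  induction l with
  | nil => simp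
  | cons x xs ih =>
    intro h
    have hx : 1 ≤ x.length := h x (by simp)
    have := ih (fun b hb => h b (by simp [hb]))
    simp only [List.map_cons, List.sum_cons, List.length_cons, List.length_tail] at this ⊢
    omega

-- the while loop of B's `weave`: each round advances every still-live block's
-- iterator by one (modelled as keeping the suffix), dropping exhausted blocks
def pvPeel (its : List (List Int)) : List Int :=
  if its = [] then []
  else
    (its.filter (fun b => !b.isEmpty)).map (fun b => b.headD 0) ++
      pvPeel ((its.filter (fun b => !b.isEmpty)).map (fun b => b.tail))
termination_by (its.map List.length).sum + its.length
decreasing_by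
  rename_i h
  rw [List.map_map, List.length_map,
      List.map_subtype (g := fun b => b.tail.length) (fun x hx => rfl),
      List.unattach_filter (g := fun b => !b.isEmpty) (hf := fun x hx => rfl),
      List.unattach_attach, ← List.length_unattach,
      List.unattach_filter (g := fun b => !b.isEmpty) (hf := fun x hx => rfl),
      List.unattach_attach]
  have hsub : ((its.filter (fun b => !b.isEmpty)).map List.length).sum ≤ (its.map List.length).sum :=
    ((List.filter_sublist (l := its)).map List.length).sum_le_sum (by simp)
  have hpos : 0 < its.length := List.length_pos_iff.mpr h
  have hkey := pvAux (its.filter (fun b => !b.isEmpty))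
    (fun b hb => by
      have := List.of_mem_filter hb
      simp [List.isEmpty_iff, List.length_pos_iff] at this
      exact List.length_pos_iff.mpr this)
  have hlen : (its.filter (fun b => !b.isEmpty)).length ≤ its.length := List.length_filter_le _ _
  omega

def interleave_blocks_py_alt (data_blocks : List (List Int)) (ec_blocks : List (List Int)) : List Int :=
  pvPeel data_blocks ++ pvPeel ec_blocks

-- ===== PRECONDITION & SPEC =====
-- Pre_ excludes only empty data_blocks, on which Python's max() raises ValueError.
def Pre_interleave_blocks_py (data_blocks : List (List Int)) (ec_blocks : List (List Int)) : Prop := data_blocks ≠ []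
instance (data_blocks : List (List Int)) (ec_blocks : List (List Int)) : Decidable (Pre_interleave_blocks_py data_blocks ec_blocks) := by unfold Pre_interleave_blocks_py; infer_instance
def pvWitness_interleave_blocks_py : List (List Int) × List (List Int) := ([[1, 2], [3]], [[4], [5, 6]])

def Spec_interleave_blocks_py (data_blocks : List (List Int)) (ec_blocks : List (List Int)) (out : List Int) : Prop := out = interleave_blocks_py_alt data_blocks ec_blocks
instance (data_blocks : List (List Int)) (ec_blocks : List (List Int)) (out : List Int) : Decidable (Spec_interleave_blocks_py data_blocks ec_blocks out) := by unfold Spec_interleave_blocks_py; infer_instance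

-- ===== CLAIM (what is proved, stated in full; the proofs are below) =====
def Claim_equal_interleave_blocks_py : Prop := ∀ (data_blocks : List (List Int)) (ec_blocks : List (List Int)), Dom_interleave_blocks_py data_blocks ec_blocks → Pre_interleave_blocks_py data_blocks ec_blocks → Spec_interleave_blocks_py data_blocks ec_blocks (interleave_blocks_py data_blocks ec_blocks)
-- ===== LEMMAS AND PROOFS =====

theorem pvPeel_nil : pvPeel [] = [] := by rw [pvPeel.eq_def]; simp

-- pvPeel ignores already-empty entries (they are filtered in the first round)
theorem pvPeel_filter (xs : List (List Int)) :
    pvPeel (xs.filter (fun b => !b.isEmpty)) = pvPeel xs := by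
  by_cases hx : xs = []
  · subst hx; simp
  · rw [pvPeel.eq_def (its := xs), if_neg hx]
    by_cases hf : xs.filter (fun b => !b.isEmpty) = []
    · rw [hf, pvPeel_nil]
      simp [pvPeel_nil]
    · rw [pvPeel.eq_def (its := xs.filter (fun b => !b.isEmpty)), if_neg hf,
          List.filter_filter]
      simp

-- filtering the still-live blocks after a peel = peeling the blocks that had ≥ 2 elements
theorem pvTailFilter (l : List (List Int)) :
    (l.map List.tail).filter (fun b => !b.isEmpty)
      = (l.filter (fun b => 1 < b.length)).map List.tail := by
  induction l with
  | nil => simp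
  | cons b bs ih =>
    have hb : (!b.tail.isEmpty) = decide (1 < b.length) := by
      cases b with
      | nil => simp
      | cons x t => cases t <;> simp
    by_cases h : 1 < b.length
    · rw [List.map_cons, List.filter_cons_of_pos (by rw [hb]; simpa using h),
          List.filter_cons_of_pos (by simpa using h), List.map_cons, ih]
    · rw [List.map_cons, List.filter_cons_of_neg (by rw [hb]; simpa using h),
          List.filter_cons_of_neg (by simpa using h), ih]

-- the blocks still alive at row i, already peeled down to their tail from i
def pvLive (blocks : List (List Int)) (i : Nat) : List (List Int) :=
  (blocks.filter (fun b => decide (i < b.length))).map (fun b => b.drop i)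

theorem pvLive_zero (blocks : List (List Int)) :
    pvLive blocks 0 = blocks.filter (fun b => !b.isEmpty) := by
  unfold pvLive
  rw [List.filter_congr (q := fun b => !b.isEmpty) (fun b _ => by cases b <;> simp)]
  simp

theorem pvLive_succ (blocks : List (List Int)) (i : Nat) :
    pvLive blocks (i + 1)
      = ((pvLive blocks i).filter (fun b => 1 < b.length)).map List.tail := by
  unfold pvLive
  induction blocks with
  | nil => simp
  | cons b bs ih =>
    by_cases h : i < b.length
    · by_cases h2 : i + 1 < b.length
      · rw [List.filter_cons_of_pos (by simpa using h2), List.filter_cons_of_pos (by simpa using h),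
            List.map_cons, List.map_cons, List.filter_cons_of_pos (by simp [List.length_drop]; omega),
            List.map_cons, List.tail_drop, ih]
      · rw [List.filter_cons_of_neg (by simpa using h2), List.filter_cons_of_pos (by simpa using h),
            List.map_cons, List.filter_cons_of_neg (by simp [List.length_drop]; omega), ih]
    · have h2 : ¬ (i + 1 < b.length) := by omega
      rw [List.filter_cons_of_neg (by simpa using h2), List.filter_cons_of_neg (by simpa using h), ih]

theorem pvLive_heads (blocks : List (List Int)) (i : Nat) :
    (pvLive blocks i).map (fun b => b.headD 0)
      = (blocks.filter (fun b => decide (i < b.length))).map (fun b => b.getD i 0) := by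
  unfold pvLive
  rw [List.map_map]
  refine List.map_congr_left (fun b hb => ?_)
  simp [List.headD_eq_head?_getD, List.head?_drop, List.getD_eq_getElem?_getD]

-- every block alive at row i is nonempty
theorem pvLive_filter_self (blocks : List (List Int)) (i : Nat) :
    (pvLive blocks i).filter (fun b => !b.isEmpty) = pvLive blocks i := by
  refine List.filter_eq_self.mpr (fun b hb => ?_)
  unfold pvLive at hb
  obtain ⟨c, hc, rfl⟩ := List.mem_map.mp hb
  have : i < c.length := by simpa using List.of_mem_filter hc
  simp [List.isEmpty_iff, List.drop_eq_nil_iff]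
  omega

theorem pv_le_foldl_max (l : List Nat) (a : Nat) : a ≤ l.foldl max a := by
  induction l generalizing a with
  | nil => simp
  | cons x xs ih => exact le_trans (Nat.le_max_left a x) (ih (max a x))

theorem pv_mem_le_foldl_max (l : List Nat) (x : Nat) (hx : x ∈ l) (a : Nat) :
    x ≤ l.foldl max a := by
  induction l generalizing a with
  | nil => simp at hx
  | cons y ys ih =>
    rw [List.foldl_cons]
    rcases List.mem_cons.mp hx with h | h
    · exact le_trans (h ▸ Nat.le_max_right a y) (pv_le_foldl_max ys (max a y))
    · exact ih h (max a y)

theorem pvMax_le (blocks : List (List Int)) (b : List Int) (hb : b ∈ blocks) :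
    b.length ≤ (blocks.map List.length).foldl max 0 :=
  pv_mem_le_foldl_max _ _ (List.mem_map_of_mem hb) 0

-- A's inner loop over the blocks appends exactly the heads of the live blocks at row i
theorem pvInner (blocks : List (List Int)) (i : Nat) (r : List Int) :
    blocks.foldl (fun r block => if i < block.length then r ++ [block.getD i 0] else r) r
      = r ++ (blocks.filter (fun b => decide (i < b.length))).map (fun b => b.getD i 0) := by
  induction blocks generalizing r with
  | nil => simp
  | cons b bs ih =>
    rw [List.foldl_cons]
    by_cases h : i < b.length
    · rw [if_pos h, ih, List.filter_cons_of_pos (by simpa using h), List.map_cons,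
          List.append_assoc, List.singleton_append]
    · rw [if_neg h, ih, List.filter_cons_of_neg (by simpa using h)]

-- one peeling round on the live blocks at row i = A's row i followed by the rounds from i+1
theorem pvStep (blocks : List (List Int)) (i : Nat) (h : pvLive blocks i ≠ []) :
    pvPeel (pvLive blocks i)
      = (blocks.filter (fun b => decide (i < b.length))).map (fun b => b.getD i 0)
        ++ pvPeel (pvLive blocks (i + 1)) := by
  rw [pvPeel.eq_def, if_neg h, pvLive_filter_self, pvLive_heads]
  congr 1
  rw [← pvPeel_filter ((pvLive blocks i).map (fun b => b.tail))]
  have : (pvLive blocks i).map (fun b => b.tail) = (pvLive blocks i).map List.tail := rfl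
  rw [this, pvTailFilter, ← pvLive_succ]

theorem pvKey (blocks : List (List Int)) :
    ∀ (n i : Nat) (acc : List Int), (blocks.map List.length).foldl max 0 ≤ i + n →
      (List.range' i n).foldl
        (fun r j => blocks.foldl
          (fun r block => if j < block.length then r ++ [block.getD j 0] else r) r) acc
      = acc ++ pvPeel (pvLive blocks i) := by
  intro n
  induction n with
  | zero =>
    intro i acc h
    have hnil : pvLive blocks i = [] := by
      unfold pvLive
      rw [List.filter_eq_nil_iff.mpr, List.map_nil]
      intro b hb
      have := pvMax_le blocks b hb
      simp; omega
    simp [hnil, pvPeel_nil]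
  | succ n ih =>
    intro i acc h
    rw [List.range'_succ, List.foldl_cons, pvInner, ih (i + 1) _ (by omega), List.append_assoc]
    congr 1
    by_cases hl : pvLive blocks i = []
    · have hrow : (blocks.filter (fun b => decide (i < b.length))).map (fun b => b.getD i 0) = [] := by
        rw [← pvLive_heads, hl, List.map_nil]
      rw [hrow, pvLive_succ, hl]
      simp [pvPeel_nil]
    · rw [pvStep blocks i hl]

theorem pvPhase (blocks : List (List Int)) (acc : List Int) :
    (List.range ((blocks.map List.length).foldl max 0)).foldl
      (fun r j => blocks.foldl
        (fun r block => if j < block.length then r ++ [block.getD j 0] else r) r) acc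
    = acc ++ pvPeel blocks := by
  rw [List.range_eq_range', pvKey blocks _ 0 acc (by omega), pvLive_zero, pvPeel_filter]

-- ===== VERDICT (by name: the statement is the Claim_ definition above) =====
theorem interleave_blocks_py_spec : Claim_equal_interleave_blocks_py := by
  intro data_blocks ec_blocks _ _
  show _ = _
  unfold interleave_blocks_py interleave_blocks_py_alt
  by_cases h : ec_blocks.isEmpty
  · have he : ec_blocks = [] := by simpa [List.isEmpty_iff] using h
    subst he
    simp only [List.isEmpty_nil, if_pos, List.range_zero, List.foldl_nil]
    rw [pvPhase]
    simp [pvPeel_nil]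
  · simp only [h, Bool.false_eq_true, if_false]
    rw [pvPhase, pvPhase]
    simp
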